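-- pv_equiv track=rewrite | github.com/osniandrade/42_piscine | pessoal/rush01/skyscrapper.py | satisfies_lft
-- ===== SOURCE A (Python) =====
-- def satisfies_lft(dimension, row, lftview):
-- 	if len(set(row)) < dimension:
-- 		return False
-- 	if lftview == 0:
-- 		return True
-- 	seen = 0
-- 	curr_max = 0
-- 	for entry in row:
-- 		if entry > curr_max:
-- 			curr_max = entry
-- 			seen += 1
-- 			if entry == dimension or seen > lftview:
-- 				break
-- 	return lftview == seen
-- ===== SOURCE B (Python) =====
-- def satisfies_lft(dimension, row, lftview):
--     if len(set(row)) < dimension: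
--         return False
--     if lftview == 0:
--         return True
--     # Build the strictly increasing list of left-to-right maxima (heights above 0),
--     # then decide by position arithmetic: if `dimension` is one of them the count
--     # that matters is its 1-based position (nothing behind the tallest-allowed
--     # building counts), otherwise it is the number of maxima.
--     peaks = []
--     for e in row:
--         if e > (peaks[-1] if peaks else 0):
--             peaks.append(e)
--     visible = peaks.index(dimension) + 1 if dimension in peaks else len(peaks)
--     return lftview == visible
-- ===== Notes on version B (the rewrite author's own statement) =====
-- stated objective: alternative
-- what changed: Replaces A's incremental counter loop with its two early-break conditions by building the list of left-view peaks in one pass and deciding by position arithmetic (index of `dimension` among the peaks, or their count), dropping the seen>lftview break which never affects the result.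
import Mathlib
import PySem

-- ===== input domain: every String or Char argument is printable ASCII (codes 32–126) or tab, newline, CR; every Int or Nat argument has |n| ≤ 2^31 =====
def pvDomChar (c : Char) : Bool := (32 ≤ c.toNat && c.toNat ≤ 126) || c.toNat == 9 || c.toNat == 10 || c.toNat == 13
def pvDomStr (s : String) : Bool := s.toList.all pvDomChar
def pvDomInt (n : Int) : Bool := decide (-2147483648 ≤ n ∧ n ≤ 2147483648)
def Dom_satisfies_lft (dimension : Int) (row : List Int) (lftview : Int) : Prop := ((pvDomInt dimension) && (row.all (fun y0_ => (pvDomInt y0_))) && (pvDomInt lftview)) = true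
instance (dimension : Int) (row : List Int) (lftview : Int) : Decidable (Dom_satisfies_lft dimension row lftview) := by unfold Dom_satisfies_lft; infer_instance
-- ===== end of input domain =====

-- B replaces A's counting loop with two breaks by building the list of left-view peaks
-- and deciding by position arithmetic (objective: alternative decomposition, same cost).

-- ===== PORT A =====
-- the for-loop of A: state (seen, curr_max), early return (break) when
-- entry == dimension or seen > lftview after incrementing
def satLoopA (dimension lftview : Int) : List Int → Int → Int → Int
  | [], seen, _ => seen
  | e :: rest, seen, curr_max =>
    if e > curr_max then
      if e = dimension ∨ seen + 1 > lftview then seen + 1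
      else satLoopA dimension lftview rest (seen + 1) e
    else satLoopA dimension lftview rest seen curr_max

def satisfies_lft (dimension : Int) (row : List Int) (lftview : Int) : Bool :=
  if ((PySem.Set.ofList row).length : Int) < dimension then false
  else if lftview = 0 then true
  else decide (lftview = satLoopA dimension lftview row 0 0)

-- ===== PORT B =====
-- peaks loop of Source B: append e when e > (peaks[-1] if peaks else 0)
def peaksLoop : List Int → List Int → List Int
  | [], acc => acc
  | e :: rest, acc =>
    if e > acc.getLast?.getD 0 then peaksLoop rest (acc ++ [e]) else peaksLoop rest acc

-- `peaks.index(dimension) + 1 if dimension in peaks else len(peaks)`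
def pvVisible (dimension : Int) (peaks : List Int) : Int :=
  match PySem.List.index? peaks dimension with
  | some i => (i : Int) + 1
  | none => (peaks.length : Int)

def satisfies_lft_alt (dimension : Int) (row : List Int) (lftview : Int) : Bool :=
  if ((PySem.Set.ofList row).length : Int) < dimension then false
  else if lftview = 0 then true
  else decide (lftview = pvVisible dimension (peaksLoop row []))

-- ===== PRECONDITION & SPEC =====
def Spec_satisfies_lft (dimension : Int) (row : List Int) (lftview : Int) (out : Bool) : Prop := out = satisfies_lft_alt dimension row lftview
instance (dimension : Int) (row : List Int) (lftview : Int) (out : Bool) : Decidable (Spec_satisfies_lft dimension row lftview out) := by unfold Spec_satisfies_lft; infer_instance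

-- ===== CLAIM (what is proved, stated in full; the proofs are below) =====
def Claim_equal_satisfies_lft : Prop := ∀ (dimension : Int) (row : List Int) (lftview : Int), Dom_satisfies_lft dimension row lftview → Spec_satisfies_lft dimension row lftview (satisfies_lft dimension row lftview)

-- ===== LEMMAS AND PROOFS =====

-- peaksLoop only appends to its accumulator
theorem peaksLoop_prefix (rest : List Int) : ∀ acc : List Int, ∃ tail, peaksLoop rest acc = acc ++ tail := by
  induction rest with
  | nil => intro acc; exact ⟨[], by simp [peaksLoop]⟩
  | cons e rest ih =>
    intro acc
    unfold peaksLoop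
    by_cases h : e > acc.getLast?.getD 0
    · obtain ⟨t, ht⟩ := ih (acc ++ [e])
      exact ⟨e :: t, by simp [h, ht]⟩
    · obtain ⟨t, ht⟩ := ih acc
      exact ⟨t, by simp [h, ht]⟩

-- when dimension is not among the first acc.length peaks, the visible count is at least acc.length
theorem pvVisible_ge (dimension : Int) (acc tail : List Int) (hnm : dimension ∉ acc) :
    (acc.length : Int) ≤ pvVisible dimension (acc ++ tail) := by
  unfold pvVisible
  cases h : PySem.List.index? (acc ++ tail) dimension with
  | none => simp
  | some k =>
    obtain ⟨hk, hval, -⟩ := PySem.List.getElem_of_index?_eq_some h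
    have hge : acc.length ≤ k := by
      by_contra hlt
      rw [Nat.not_le] at hlt
      have hm : dimension ∈ acc := by
        rw [← hval, List.getElem_append_left hlt]; exact List.getElem_mem _
      exact hnm hm
    simp; omega

-- core invariant: A's loop from state (acc.length, last acc) agrees (as a test against
-- lftview) with B's position arithmetic over the finished peaks list
theorem key (dimension lftview : Int) (rest : List Int) : ∀ acc : List Int, dimension ∉ acc →
    ((lftview = satLoopA dimension lftview rest (acc.length : Int) (acc.getLast?.getD 0)) ↔
     (lftview = pvVisible dimension (peaksLoop rest acc))) := by
  induction rest with
  | nil =>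
    intro acc hnm
    have hn : PySem.List.index? acc dimension = none :=
      (PySem.List.index?_eq_none_iff acc dimension).mpr hnm
    simp only [satLoopA, peaksLoop, pvVisible, hn]
  | cons e rest ih =>
    intro acc hnm
    unfold satLoopA peaksLoop
    by_cases hgt : e > acc.getLast?.getD 0
    · simp only [hgt, if_pos]
      by_cases hed : e = dimension
      · -- A breaks with seen = acc.length + 1; B finds dimension at index acc.length
        subst hed
        simp only [true_or, if_pos]
        obtain ⟨tail, htail⟩ := peaksLoop_prefix rest (acc ++ [e])
        have hidx : PySem.List.index? ((acc ++ [e]) ++ tail) e = some acc.length := by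
          rw [PySem.List.index?_append_of_mem tail (by simp),
              PySem.List.index?_append_singleton_self acc e hnm]
        rw [htail]
        unfold pvVisible
        rw [hidx]
      · by_cases hbig : (acc.length : Int) + 1 > lftview
        · -- A breaks via seen > lftview: both sides false
          simp only [hed, hbig, false_or, if_pos]
          have hnm' : dimension ∉ acc ++ [e] := by
            simp only [List.mem_append, List.mem_singleton]
            rintro (h | h)
            exacts [hnm h, hed h.symm]
          obtain ⟨tail, htail⟩ := peaksLoop_prefix rest (acc ++ [e])
          rw [htail]
          have hge := pvVisible_ge dimension (acc ++ [e]) tail hnm'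
          rw [List.length_append, List.length_singleton] at hge
          push_cast at hge
          constructor <;> intro h <;> omega
        · simp only [hed, hbig, false_or, if_neg, not_false_iff]
          have hnm' : dimension ∉ acc ++ [e] := by
            simp only [List.mem_append, List.mem_singleton]
            rintro (h | h)
            exacts [hnm h, hed h.symm]
          have := ih (acc ++ [e]) hnm'
          simpa using this
    · simp only [hgt, if_neg, not_false_iff]
      exact ih acc hnm

-- ===== VERDICT (by name: the statement is the Claim_ definition above) =====
theorem satisfies_lft_spec : Claim_equal_satisfies_lft := by
  intro dimension row lftview _
  unfold Spec_satisfies_lft satisfies_lft satisfies_lft_alt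
  by_cases h1 : ((PySem.Set.ofList row).length : Int) < dimension
  · simp [h1]
  · by_cases h2 : lftview = 0
    · simp [h1, h2]
    · simp only [h1, h2, if_neg, not_false_iff]
      exact decide_eq_decide.mpr (by simpa using key dimension lftview row [] (by simp))
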